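-- pv_equiv track=rewrite | github.com/LlYySsSs/MASFactory | applications/clawcanvas/backend/clawcanvas_backend/runtime_bindings.py | _extract_setting
-- ===== SOURCE A (Python) =====
-- def _extract_setting(description: str, key: str) -> str | None:
--     for chunk in str(description or "").splitlines():
--         for piece in chunk.split(";"):
--             piece = piece.strip()
--             if not piece or "=" not in piece:
--                 continue
--             current_key, value = piece.split("=", 1)
--             if current_key.strip().lower() == key.lower():
--                 return value.strip()
--     return None
-- ===== SOURCE B (Python) =====
-- def _extract_setting(description: str, key: str) -> str | None:
--     # Build-index-then-lookup: parse every 'k=v' piece into a dict (first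
--     # occurrence per key wins via setdefault), then look the key up once.
--     pieces = (
--         piece
--         for chunk in str(description or "").splitlines()
--         for piece in chunk.split(";")
--     )
--     settings = {}
--     for piece in pieces:
--         piece = piece.strip()
--         if not piece or "=" not in piece:
--             continue
--         k, v = piece.split("=", 1)
--         settings.setdefault(k.strip().lower(), v.strip())
--     return settings.get(key.lower())
-- ===== Notes on version B (the rewrite author's own statement) =====
-- stated objective: idiomatic
-- what changed: B replaces A's nested scan-with-early-return by flattening all pieces, building a first-occurrence settings dict with setdefault, and returning a single dict lookup of the lowered key.
import Mathlib
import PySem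

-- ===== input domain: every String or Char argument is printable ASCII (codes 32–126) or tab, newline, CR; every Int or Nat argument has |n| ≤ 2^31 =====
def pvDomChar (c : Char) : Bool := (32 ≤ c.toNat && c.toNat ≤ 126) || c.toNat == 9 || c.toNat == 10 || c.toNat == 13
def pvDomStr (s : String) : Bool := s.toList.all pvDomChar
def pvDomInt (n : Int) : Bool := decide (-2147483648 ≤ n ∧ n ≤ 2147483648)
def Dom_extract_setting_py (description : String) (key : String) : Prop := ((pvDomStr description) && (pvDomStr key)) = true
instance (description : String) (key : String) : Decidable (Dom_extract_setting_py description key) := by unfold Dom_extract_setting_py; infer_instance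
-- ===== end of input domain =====

-- B builds a first-occurrence settings dict from all pieces and looks the key up once,
-- instead of A's nested scan with early return (objective: idiomatic; same cost).


-- ===== PORT A =====
-- shared per-piece parsing (both Pythons contain this identical piece-handling code):
-- strip; skip empty / no '='; split('=', 1); return (key stripped+lowered, value stripped)
def pvParsePiece (piece : String) : Option (String × String) :=
  let p := PySem.Str.strip piece
  if p = "" || !(PySem.Str.isIn "=" p) then none
  else
    match (PySem.Str.splitMax? p "=" 1).getD [] with
    | ck :: v :: _ => some (PySem.Str.lower (PySem.Str.strip ck), PySem.Str.strip v)
    | _ => none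

-- A: nested early-return loops — first piece whose key matches wins
def extract_setting_py (description : String) (key : String) : Option String :=
  (PySem.Str.splitlines description).findSome? fun chunk =>
    ((PySem.Str.split? chunk ";").getD []).findSome? fun piece =>
      match pvParsePiece piece with
      | some (ck, v) => if ck = PySem.Str.lower key then some v else none
      | none => none

-- ===== PORT B =====
-- B: flatten all pieces, build a dict with setdefault (first occurrence per key), lookup once
def pvAddPiece (d : PySem.Dict String String) (piece : String) : PySem.Dict String String :=
  match pvParsePiece piece with
  | some (k, v) => d.setdefault k v
  | none => d

def extract_setting_py_alt (description : String) (key : String) : Option String :=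
  let settings :=
    ((PySem.Str.splitlines description).flatMap
        (fun chunk => (PySem.Str.split? chunk ";").getD [])).foldl pvAddPiece PySem.Dict.empty
  settings.get? (PySem.Str.lower key)

-- ===== PRECONDITION & SPEC =====
def Spec_extract_setting_py (description : String) (key : String) (out : Option String) : Prop := out = extract_setting_py_alt description key
instance (description : String) (key : String) (out : Option String) : Decidable (Spec_extract_setting_py description key out) := by unfold Spec_extract_setting_py; infer_instance

-- ===== CLAIM (what is proved, stated in full; the proofs are below) =====
def Claim_equal_extract_setting_py : Prop := ∀ (description : String) (key : String), Dom_extract_setting_py description key → Spec_extract_setting_py description key (extract_setting_py description key)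

-- ===== LEMMAS AND PROOFS =====

-- first match of a single piece against the lowered key (the body of A's inner loop)
def pvMatch (kl : String) (piece : String) : Option String :=
  match pvParsePiece piece with
  | some (ck, v) => if ck = kl then some v else none
  | none => none

-- findSome? distributes over flatMap
theorem pv_findSome?_flatMap {α β γ : Type} (l : List α) (g : α → List β) (f : β → Option γ) :
    (l.flatMap g).findSome? f = l.findSome? (fun x => (g x).findSome? f) := by
  induction l with
  | nil => rfl
  | cons x xs ih =>
    simp only [List.flatMap_cons, List.findSome?_append, List.findSome?_cons, ih]
    cases List.findSome? f (g x) <;> rfl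

-- dict-fold invariant: looking up kl after folding pvAddPiece over ps sees the
-- accumulator's binding first, else the first matching piece of ps
theorem pv_fold_get (kl : String) (ps : List String) :
    ∀ d : PySem.Dict String String,
      (ps.foldl pvAddPiece d).get? kl = (d.get? kl).or (ps.findSome? (pvMatch kl)) := by
  induction ps with
  | nil =>
    intro d
    simp only [List.foldl_nil, List.findSome?_nil]
    cases d.get? kl <;> rfl
  | cons p ps ih =>
    intro d
    simp only [List.foldl_cons, ih, List.findSome?_cons]
    unfold pvAddPiece
    cases hp : pvParsePiece p with
    | none => simp [pvMatch, hp]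
    | some kv =>
      obtain ⟨k, v⟩ := kv
      by_cases hk : k = kl
      · subst hk
        rw [PySem.Dict.get?_setdefault_self]
        simp only [pvMatch, hp]
        cases d.get? k <;> rfl
      · rw [PySem.Dict.get?_setdefault_of_ne d v (Ne.symm hk)]
        simp [pvMatch, hp, hk]

-- ===== VERDICT (by name: the statement is the Claim_ definition above) =====
theorem extract_setting_py_spec : Claim_equal_extract_setting_py := by
  intro description key _
  unfold Spec_extract_setting_py extract_setting_py extract_setting_py_alt
  rw [pv_fold_get (PySem.Str.lower key) _ PySem.Dict.empty]
  simp only [PySem.Dict.get?_empty, Option.none_or]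
  rw [pv_findSome?_flatMap]
  rfl
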